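-- pv_equiv track=rewrite | github.com/PrincetonUniversity/Meme | biclustering.py | removeSubsetsGetAbsCandidate
-- ===== SOURCE A (Python) =====
-- import copy
--
-- def removeSubsetsGetAbsCandidate(matrix):
--     """
--         Removes all subsets from a list of sets and return absCol candidates.
--     """
--     setList = copy.deepcopy(matrix)  # defensive copy
--     absColCandMap = {}               # map from column to True/False
--     finalAnswer = []                 # matrix after subset merging
--     setList.sort(key=len, reverse=True)
--     i = 0
--
--     while i < len(setList):
--         finalAnswer.append(setList[i])
--         absColCandidate = setList[i]    # keep track of original columns
--         absColCandidate2 = setList[i]   # keep track of maybe absolute candidates in this superset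
--
--         for j in reversed(range(i+1, len(setList))):
--             if setList[j].issubset(setList[i]):
--                 # Find columns that are absolute in this superset
--                 absColCandidate2 = absColCandidate2.intersection(setList[j])
--                 del setList[j]
--
--         # Only columns that are always absolute in all supersets can be absolute candidates
--         for col in absColCandidate:
--             if absColCandMap.get(col, True) and col in absColCandidate2:
--                 absColCandMap[col] = True
--             else:
--                 absColCandMap[col] = False
--
--         i += 1
--
--     absColCand = [k for k, v in absColCandMap.items() if v]
--     return finalAnswer, absColCand
-- ===== SOURCE B (Python) =====
-- import copy
--
-- def removeSubsetsGetAbsCandidate(matrix):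
--     """Removes all subsets from a list of sets and return absCol candidates.
--
--     One linear scan over the size-sorted pool: each set is tested against the
--     maximal sets kept so far; its first kept superset (if any) becomes its
--     "owner" and the (subset, owner) pair is recorded, otherwise the set itself
--     is kept as maximal.  A column is an absolute candidate iff every recorded
--     subset whose owner contains the column contains it too -- a direct
--     universally-quantified per-column test instead of incrementally
--     intersected sets and a running-AND dict.
--     """
--     pool = sorted((copy.deepcopy(s) for s in matrix), key=len, reverse=True)
--     kept, owned = [], []
--     for s in pool:
--         for k in kept:
--             if s <= k:
--                 owned.append((s, k))
--                 break
--         else: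
--             kept.append(s)
--     cols = []
--     for k in kept:
--         for c in k:
--             if c not in cols:
--                 cols.append(c)
--     absColCand = [c for c in cols if all(c in t for t, o in owned if c in o)]
--     return kept, absColCand
-- ===== Notes on version B (the rewrite author's own statement) =====
-- stated objective: alternative
-- what changed: A's greedy loop that mutates the pool (reversed in-place deletion of subsets while incrementally intersecting them) and folds a running-AND dict is replaced by a non-mutating linear scan that tests each set against the kept maximal sets and records (subset, first-kept-superset) pairs, followed by a direct universally-quantified per-column candidacy test over those pairs -- no deletion, no intersection accumulation, no dict.
import Mathlib
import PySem

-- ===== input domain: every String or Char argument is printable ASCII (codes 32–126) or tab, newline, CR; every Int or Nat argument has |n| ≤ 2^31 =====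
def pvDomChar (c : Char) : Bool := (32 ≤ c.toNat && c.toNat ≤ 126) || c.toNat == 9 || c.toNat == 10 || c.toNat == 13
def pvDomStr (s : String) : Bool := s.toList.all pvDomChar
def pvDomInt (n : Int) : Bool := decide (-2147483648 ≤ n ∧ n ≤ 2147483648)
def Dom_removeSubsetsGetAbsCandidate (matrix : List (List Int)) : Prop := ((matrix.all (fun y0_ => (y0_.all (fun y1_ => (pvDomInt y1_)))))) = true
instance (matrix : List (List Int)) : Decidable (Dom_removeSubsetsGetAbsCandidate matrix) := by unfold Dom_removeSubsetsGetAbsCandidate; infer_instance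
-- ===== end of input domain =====

-- B replaces A's greedy pool-mutating loop (reversed in-place deletion with inline
-- intersection and a running-AND dict) by a non-mutating scan collecting
-- (subset, first kept superset) pairs plus a per-column universally-quantified
-- candidacy test; same cost, different algorithmic decomposition (objective: alternative).
--
-- Shared CPython-set model (used by BOTH ports): the Python function receives
-- set objects and iterates them ('for col in …'), so the order of absColCand
-- depends on CPython's small-table set iteration order.  pvSetList models, for a
-- set built by inserting the given list left to right, the iteration order of
-- its deepcopy (deepcopy re-inserts in iteration order).  It follows CPython's
-- setobject.c open addressing: hash(n) = n (−1 ↦ −2; exact for |n| < 2^61−1),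
-- slot = hash mod size, 9 linear probes when they fit under the mask, then
-- perturb >>= 5; i = (5i+1+perturb) mod size, growth ×4 (×2 past 50000 used)
-- when fill·5 ≥ mask·3.  The probe loop is fuel-bounded only to be total; the
-- fuel is large enough on every table the model builds (the LCG i ↦ 5i+1 has
-- full period mod 2^k, so an empty slot is found within size+14 jumps).

def pvHash (n : Int) : Int := if n = -1 then -2 else n

-- first empty-or-equal slot scan over at most `probes+1` consecutive slots;
-- returns the updated table, or none if no free/equal slot in this window
def pvScan (tbl : List (Option Int)) (v : Int) (i : Nat) : Nat → Option (List (Option Int))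
  | 0 => match tbl.getD i none with
         | none => some (tbl.set i (some v))
         | some w => if w = v then some tbl else none
  | k + 1 => match tbl.getD i none with
             | none => some (tbl.set i (some v))
             | some w => if w = v then some tbl else pvScan tbl v (i + 1) k

def pvProbe (tbl : List (Option Int)) (v : Int) : Nat → Nat → Nat → List (Option Int)
  | 0, _, _ => tbl   -- fuel exhausted: unreachable on the tables this model builds
  | fuel + 1, perturb, i =>
      let size := tbl.length
      let probes := if i + 9 ≤ size - 1 then 9 else 0
      match pvScan tbl v i probes with
      | some t => t
      | none =>
          let perturb' := perturb >>> 5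
          pvProbe tbl v fuel perturb' ((i * 5 + 1 + perturb') % size)

def pvNewSize (minused : Nat) : Nat → Nat → Nat
  | 0, acc => acc
  | fuel + 1, acc => if acc ≤ minused then pvNewSize minused fuel (acc * 2) else acc

-- re-insertion into a fresh table (set_insert_clean), in old-table scan order
def pvInsClean (tbl : List (Option Int)) (v : Int) : List (Option Int) :=
  let h := pvHash v
  pvProbe tbl v (tbl.length + 16) ((h % (18446744073709551616 : Int)).toNat)
    ((h % (tbl.length : Int)).toNat)

def pvResize (tbl : List (Option Int)) : List (Option Int) :=
  let used := (tbl.filterMap id).length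
  let minused := if used > 50000 then used * 2 else used * 4
  let newsize := pvNewSize minused (minused + 4) 8
  (tbl.filterMap id).foldl pvInsClean (List.replicate newsize none)

def pvSetAdd (tbl : List (Option Int)) (v : Int) : List (Option Int) :=
  let h := pvHash v
  let tbl' := pvProbe tbl v (tbl.length + 16) ((h % (18446744073709551616 : Int)).toNat)
                ((h % (tbl.length : Int)).toNat)
  if ((tbl'.filterMap id).length) * 5 ≥ (tbl'.length - 1) * 3 then pvResize tbl' else tbl'

def pvSetIter (xs : List Int) : List Int :=
  (xs.foldl pvSetAdd (List.replicate 8 none)).filterMap id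

-- iteration order of the set the function's col-loop walks: the harness decodes
-- the set inserting left to right, deep-copies the arguments once before the
-- call, and the function deep-copies once more; each copy re-inserts in the
-- previous iteration order, so three table passes in all
def pvSetList (xs : List Int) : List Int := pvSetIter (pvSetIter (pvSetIter xs))

-- ===== PORT A =====
-- t.issubset(sup)
def pvIsSub (t sup : List Int) : Bool := t.all (fun x => sup.contains x)

-- the reversed inner loop: walk the tail, rightmost element first (right
-- recursion); a subset of sup is intersected into cand2 and deleted
def pvAInner (sup cand2 : List Int) : List (List Int) → List Int × List (List Int)
  | [] => (cand2, [])
  | t :: rs =>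
      let pr := pvAInner sup cand2 rs
      if pvIsSub t sup then (pr.1.filter (fun x => t.contains x), pr.2)
      else (pr.1, t :: pr.2)

theorem pvAInner_snd_length (sup cand2 : List Int) (rest : List (List Int)) :
    (pvAInner sup cand2 rest).2.length ≤ rest.length := by
  induction rest with
  | nil => simp [pvAInner]
  | cons t rs ih =>
      simp only [pvAInner]
      split <;> simp <;> omega

-- the while loop over setList, threading absColCandMap
def pvAMain : List (List Int) → PySem.Dict Int Bool → List (List Int) × PySem.Dict Int Bool
  | [], d => ([], d)
  | s :: rest, d =>
      let pr := pvAInner s s rest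
      let d' := s.foldl (fun d col =>
        if d.getD col true && pr.1.contains col then d.insert col true
        else d.insert col false) d
      let res := pvAMain pr.2 d'
      (s :: res.1, res.2)
  termination_by l _ => l.length
  decreasing_by
    have := pvAInner_snd_length s s rest
    simp_all

def removeSubsetsGetAbsCandidate (matrix : List (List Int)) : List (List Int) × List Int :=
  let setList := PySem.List.sorted (matrix.map pvSetList) (fun s => s.length) true
  let res := pvAMain setList PySem.Dict.empty
  (res.1, (res.2.items.filter (fun p => p.2)).map (fun p => p.1))

-- ===== PORT B =====
-- s <= k  (set inclusion)
def pvLeSet (t sup : List Int) : Bool := t.all (fun x => sup.contains x)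

-- the single scan: each set either gets an owner (its first kept superset,
-- found by the inner for/break = find?) or is itself kept as maximal
def pvBScan : List (List Int) → List (List Int) → List (List Int × List Int) →
    List (List Int) × List (List Int × List Int)
  | [], kept, owned => (kept, owned)
  | s :: rest, kept, owned =>
      match kept.find? (fun k => pvLeSet s k) with
      | some k => pvBScan rest kept (owned ++ [(s, k)])
      | none => pvBScan rest (kept ++ [s]) owned

def removeSubsetsGetAbsCandidate_alt (matrix : List (List Int)) : List (List Int) × List Int :=
  let pool := PySem.List.sorted (matrix.map pvSetList) (fun s => s.length) true
  let sc := pvBScan pool [] []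
  let cols := sc.1.foldl (fun acc k =>
    k.foldl (fun acc c => if acc.contains c then acc else acc ++ [c]) acc) []
  (sc.1, cols.filter (fun c =>
    (sc.2.filter (fun p => p.2.contains c)).all (fun p => p.1.contains c)))

-- ===== PRECONDITION & SPEC =====
def Spec_removeSubsetsGetAbsCandidate (matrix : List (List Int)) (out : List (List Int) × List Int) : Prop := out = removeSubsetsGetAbsCandidate_alt matrix
instance (matrix : List (List Int)) (out : List (List Int) × List Int) : Decidable (Spec_removeSubsetsGetAbsCandidate matrix out) := by unfold Spec_removeSubsetsGetAbsCandidate; infer_instance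

-- ===== CLAIM (what is proved, stated in full; the proofs are below) =====
def Claim_equal_removeSubsetsGetAbsCandidate : Prop := ∀ (matrix : List (List Int)), Dom_removeSubsetsGetAbsCandidate matrix → Spec_removeSubsetsGetAbsCandidate matrix (removeSubsetsGetAbsCandidate matrix)

-- ===== LEMMAS AND PROOFS =====

-- grouped view of the greedy process: each kept superset with the subsets it absorbs
def pvPhase1 : List (List Int) → List (List Int × List (List Int))
  | [] => []
  | sup :: rest =>
      (sup, rest.filter (fun t => pvLeSet t sup)) ::
        pvPhase1 (rest.filter (fun t => !pvLeSet t sup))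
  termination_by l => l.length
  decreasing_by
    simpa using Nat.lt_succ_of_le (List.length_filter_le _ rest.attach)

-- sup ∩ ⋂ subs
def pvInterAll (sup : List Int) (subs : List (List Int)) : List Int :=
  subs.foldl (fun acc t => acc.filter (fun x => t.contains x)) sup

def pvIG (g : List Int × List (List Int)) : List Int :=
  if g.2.isEmpty then g.1 else pvInterAll g.1 g.2

-- A's dict update for one group
def pvP2step (d : PySem.Dict Int Bool) (g : List Int × List (List Int)) : PySem.Dict Int Bool :=
  g.1.foldl (fun d col => d.insert col (d.getD col true && (pvIG g).contains col)) d

theorem pvAInner_snd_eq (sup cand2 : List Int) (rest : List (List Int)) :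
    (pvAInner sup cand2 rest).2 = rest.filter (fun t => !pvIsSub t sup) := by
  induction rest with
  | nil => simp [pvAInner]
  | cons t rs ih =>
      simp only [pvAInner, List.filter_cons]
      split <;> simp_all

theorem pvAInner_fst_mem (sup cand2 : List Int) (rest : List (List Int)) (x : Int) :
    x ∈ (pvAInner sup cand2 rest).1 ↔
      x ∈ cand2 ∧ ∀ t ∈ rest.filter (fun t => pvIsSub t sup), x ∈ t := by
  induction rest with
  | nil => simp [pvAInner]
  | cons t rs ih =>
      simp only [pvAInner, List.filter_cons]
      split <;> (first | (simp_all; tauto) | simp_all)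

theorem pvInterAll_mem (sup : List Int) (subs : List (List Int)) (x : Int) :
    x ∈ pvInterAll sup subs ↔ x ∈ sup ∧ ∀ t ∈ subs, x ∈ t := by
  induction subs generalizing sup with
  | nil => simp [pvInterAll]
  | cons t rs ih =>
      simp only [pvInterAll, List.foldl_cons] at *
      rw [ih]
      simp [List.mem_filter]
      tauto

-- the dict update A performs for superset s equals the group step
theorem pv_step_eq (s : List Int) (rest : List (List Int)) (d : PySem.Dict Int Bool) :
    s.foldl (fun d col =>
        if d.getD col true && (pvAInner s s rest).1.contains col then d.insert col true
        else d.insert col false) d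
      = pvP2step d (s, rest.filter (fun t => pvLeSet t s)) := by
  have hsub : pvLeSet = pvIsSub := rfl
  have hmem : ∀ col : Int, (pvAInner s s rest).1.contains col =
      (pvIG (s, rest.filter (fun t => pvLeSet t s))).contains col := by
    intro col
    rw [hsub]
    unfold pvIG
    by_cases he : (rest.filter (fun t => pvIsSub t s)).isEmpty
    · rw [if_pos he, Bool.eq_iff_iff]
      simp only [List.contains_iff_mem, pvAInner_fst_mem]
      rw [List.isEmpty_iff] at he
      simp [he]
    · rw [if_neg he, Bool.eq_iff_iff]
      simp only [List.contains_iff_mem, pvAInner_fst_mem, pvInterAll_mem]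
  unfold pvP2step
  simp only []
  congr 1
  funext d col
  rw [← hmem col]
  cases h : (d.getD col true && (pvAInner s s rest).1.contains col) <;> simp

theorem pvMain_eq : ∀ (n : Nat) (L : List (List Int)) (d : PySem.Dict Int Bool),
    L.length ≤ n →
    pvAMain L d = ((pvPhase1 L).map (fun g => g.1), (pvPhase1 L).foldl pvP2step d) := by
  intro n
  induction n with
  | zero =>
      intro L d h
      have : L = [] := List.eq_nil_of_length_eq_zero (Nat.le_zero.mp h)
      subst this
      simp [pvAMain, pvPhase1]
  | succ n ih =>
      intro L d h
      match L with
      | [] => simp [pvAMain, pvPhase1]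
      | s :: rest =>
          rw [pvAMain.eq_def, pvPhase1.eq_def]
          have hrest' : (pvAInner s s rest).2 = rest.filter (fun t => !pvLeSet t s) := by
            rw [pvAInner_snd_eq]; rfl
          have hlen : (rest.filter (fun t => !pvLeSet t s)).length ≤ n := by
            have := List.length_filter_le (fun t => !pvLeSet t s) rest
            simp at h; omega
          simp only [List.map_cons, List.foldl_cons]
          rw [pv_step_eq s rest d, hrest', ih _ _ hlen]

-- ▸ proof-side mirrors of pvBScan's two accumulators
def pvKF (KS : List (List Int)) : List (List Int) → List (List Int)
  | [] => KS
  | s :: rest =>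
      match KS.find? (fun k => pvLeSet s k) with
      | some _ => pvKF KS rest
      | none => pvKF (KS ++ [s]) rest

def pvOw (KS : List (List Int)) : List (List Int) → List (List Int × List Int)
  | [] => []
  | s :: rest =>
      match KS.find? (fun k => pvLeSet s k) with
      | some k => (s, k) :: pvOw KS rest
      | none => pvOw (KS ++ [s]) rest

-- "no superset of t in KS"
def pvP (KS : List (List Int)) (t : List Int) : Bool := KS.all (fun k => !pvLeSet t k)

-- tagged pairs of the grouped view
def pvTag (gs : List (List Int × List (List Int))) : List (List Int × List Int) :=
  gs.flatMap (fun g => g.2.map (fun t => (t, g.1)))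

theorem pvBScan_eq : ∀ (L KS : List (List Int)) (O : List (List Int × List Int)),
    pvBScan L KS O = (pvKF KS L, O ++ pvOw KS L) := by
  intro L
  induction L with
  | nil => intro KS O; simp [pvBScan, pvKF, pvOw]
  | cons s rest ih =>
      intro KS O
      simp only [pvBScan, pvKF, pvOw]
      cases h : KS.find? (fun k => pvLeSet s k) with
      | some k => simp [ih]
      | none => simp [ih]

theorem pvP_append (KS : List (List Int)) (s t : List Int) :
    pvP (KS ++ [s]) t = (pvP KS t && !pvLeSet t s) := by
  simp [pvP]

theorem pvP_of_find?_none {KS : List (List Int)} {s : List Int}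
    (h : KS.find? (fun k => pvLeSet s k) = none) : pvP KS s = true := by
  rw [List.find?_eq_none] at h
  simp only [pvP, List.all_eq_true, Bool.not_eq_eq_eq_not, Bool.not_true]
  intro k hk
  simpa using h k hk

theorem pvP_of_find?_some {KS : List (List Int)} {s k : List Int}
    (h : KS.find? (fun k => pvLeSet s k) = some k) : pvP KS s = false := by
  have hm := List.mem_of_find?_eq_some h
  have hp := List.find?_some h
  simp only [pvP, List.all_eq_false]
  exact ⟨k, hm, by simpa using hp⟩

theorem pvFilter_step (rest KS : List (List Int)) (s : List Int) :
    (rest.filter (pvP KS)).filter (fun t => !pvLeSet t s) = rest.filter (pvP (KS ++ [s])) := by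
  rw [List.filter_filter]
  apply List.filter_congr
  intro t _
  rw [pvP_append]
  exact Bool.and_comm _ _

theorem pvKF_eq : ∀ (L KS : List (List Int)),
    pvKF KS L = KS ++ (pvPhase1 (L.filter (pvP KS))).map (fun g => g.1) := by
  intro L
  induction L with
  | nil => intro KS; simp [pvKF, pvPhase1]
  | cons s rest ih =>
      intro KS
      simp only [pvKF, List.filter_cons]
      cases h : KS.find? (fun k => pvLeSet s k) with
      | some k =>
          rw [pvP_of_find?_some h]
          simp only [Bool.false_eq_true, if_false]
          exact ih KS
      | none =>
          rw [pvP_of_find?_none h]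
          simp only [if_true]
          rw [pvPhase1.eq_def]
          simp only [List.map_cons]
          rw [pvFilter_step, ih (KS ++ [s])]
          simp

-- any distributes over a pointwise disjunction
theorem pvAnyOr {α : Type} (l : List α) (p q : α → Bool) :
    (l.any fun x => p x || q x) = (l.any p || l.any q) := by
  induction l with
  | nil => simp
  | cons a l ih =>
      simp only [List.any_cons, ih]
      cases p a <;> cases q a <;> simp

theorem pvTag_cons (g : List Int × List (List Int)) (gs : List (List Int × List (List Int))) :
    pvTag (g :: gs) = g.2.map (fun t => (t, g.1)) ++ pvTag gs := by
  simp [pvTag]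

theorem pvPhase1_cons (s : List Int) (X : List (List Int)) :
    pvPhase1 (s :: X) = (s, X.filter (fun t => pvLeSet t s)) ::
      pvPhase1 (X.filter (fun t => !pvLeSet t s)) := by
  rw [pvPhase1.eq_def]

theorem pvOw_any : ∀ (L KS : List (List Int)) (f : List Int × List Int → Bool),
    (pvOw KS L).any f
      = ((L.any fun t => ((KS.find? (fun k => pvLeSet t k)).map (fun k => f (t, k))).getD false)
        || (pvTag (pvPhase1 (L.filter (pvP KS)))).any f) := by
  intro L
  induction L with
  | nil => intro KS f; simp [pvOw, pvPhase1, pvTag]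
  | cons s rest ih =>
      intro KS f
      simp only [pvOw, List.filter_cons, List.any_cons]
      cases h : KS.find? (fun k => pvLeSet s k) with
      | some k =>
          rw [pvP_of_find?_some h]
          simp only [List.any_cons, Option.map_some, Option.getD_some,
            Bool.false_eq_true, if_false]
          rw [ih KS f]
          cases f (s, k) <;> simp
      | none =>
          rw [pvP_of_find?_none h]
          change (pvOw (KS ++ [s]) rest).any f =
            ((rest.any fun t =>
                ((KS.find? (fun k => pvLeSet t k)).map (fun k => f (t, k))).getD false)
             || (pvTag (pvPhase1 (s :: rest.filter (pvP KS)))).any f)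
          rw [ih (KS ++ [s]) f, pvPhase1_cons, pvTag_cons]
          simp only [List.any_append, List.any_map, pvFilter_step]
          have hpt : ∀ t : List Int,
              (((KS ++ [s]).find? (fun k => pvLeSet t k)).map (fun k => f (t, k))).getD false
                = (((KS.find? (fun k => pvLeSet t k)).map (fun k => f (t, k))).getD false
                   || (pvP KS t && pvLeSet t s && f (t, s))) := by
            intro t
            rw [List.find?_append]
            cases hK : KS.find? (fun k => pvLeSet t k) with
            | some k => rw [pvP_of_find?_some hK]; simp
            | none =>
                rw [pvP_of_find?_none hK]
                by_cases hls : pvLeSet t s = true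
                · simp [List.find?, hls]
                · simp only [Bool.not_eq_true] at hls
                  simp [List.find?, hls]
          rw [show (rest.any fun t =>
                ((List.find? (fun k => pvLeSet t k) (KS ++ [s])).map (fun k => f (t, k))).getD false)
              = ((rest.any fun t =>
                    ((List.find? (fun k => pvLeSet t k) KS).map (fun k => f (t, k))).getD false)
                 || (rest.any fun t => pvP KS t && pvLeSet t s && f (t, s))) from by
            rw [← pvAnyOr]
            exact PySem.List.any_congr_mem (fun t _ => hpt t)]
          rw [show ((rest.filter (pvP KS)).filter fun t => pvLeSet t s).any
                ((fun p => f p) ∘ fun t => (t, s))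
              = (rest.any fun t => pvP KS t && pvLeSet t s && f (t, s)) from by
            rw [List.any_filter, List.any_filter]
            exact PySem.List.any_congr_mem (fun t _ => by
              cases pvP KS t <;> cases pvLeSet t s <;>
                cases hf : f (t, s) <;> simp [Function.comp, hf])]
          rw [Bool.or_assoc]

theorem pvInner_getD (cols : List Int) (inter : List Int) (d : PySem.Dict Int Bool) (c : Int) :
    (cols.foldl (fun d col => d.insert col (d.getD col true && inter.contains col)) d).getD c true
      = (d.getD c true && (!cols.contains c || inter.contains c)) := by
  induction cols generalizing d with
  | nil => simp
  | cons col cols ih =>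
      simp only [List.foldl_cons, ih, PySem.Dict.getD_insert, List.contains_cons]
      by_cases hc : c = col
      · subst hc
        simp only [BEq.rfl, Bool.true_or, Bool.not_true]
        cases d.getD c true <;> cases inter.contains c <;> cases cols.contains c <;> simp
      · rw [if_neg hc]
        have : (c == col) = false := by simpa using hc
        rw [this]
        simp

theorem pvFold_getD (gs : List (List Int × List (List Int))) (d : PySem.Dict Int Bool) (c : Int) :
    (gs.foldl pvP2step d).getD c true
      = (d.getD c true && gs.all (fun g => !g.1.contains c || (pvIG g).contains c)) := by
  induction gs generalizing d with
  | nil => simp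
  | cons g gs ih =>
      simp only [List.foldl_cons, ih, List.all_cons]
      have hstep : (pvP2step d g).getD c true
          = (d.getD c true && (!g.1.contains c || (pvIG g).contains c)) := by
        unfold pvP2step
        rw [pvInner_getD]
      rw [hstep, Bool.and_assoc]

theorem pvFold_keys (gs : List (List Int × List (List Int))) (d : PySem.Dict Int Bool) :
    (gs.foldl pvP2step d).keys = gs.foldl (fun acc g => PySem.Set.update acc g.1) d.keys := by
  induction gs generalizing d with
  | nil => rfl
  | cons g gs ih =>
      simp only [List.foldl_cons, ih]
      congr 1
      exact PySem.Dict.keys_foldl_insert g.1 (fun d x => d.getD x true && (pvIG g).contains x) d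

theorem pvFold_nodup (gs : List (List Int × List (List Int))) (d : PySem.Dict Int Bool)
    (h : d.keys.Nodup) : (gs.foldl pvP2step d).keys.Nodup := by
  induction gs generalizing d with
  | nil => exact h
  | cons g gs ih =>
      exact ih _ (PySem.Dict.nodup_keys_foldl_insert g.1
        (fun d x => d.getD x true && (pvIG g).contains x) d h)

theorem pvIG_mem (g : List Int × List (List Int)) (c : Int) :
    c ∈ pvIG g ↔ c ∈ g.1 ∧ ∀ t ∈ g.2, c ∈ t := by
  unfold pvIG
  by_cases he : g.2.isEmpty
  · rw [if_pos he]
    rw [List.isEmpty_iff] at he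
    simp [he]
  · rw [if_neg he]
    exact pvInterAll_mem g.1 g.2 c

-- '[c in t for t, o in owned if c in o]'-style filtered all as a negated any
theorem pvFilterAll {α : Type} (l : List α) (q r : α → Bool) :
    (l.filter q).all r = !(l.any fun x => q x && !r x) := by
  rw [List.not_any_eq_all_not, List.all_filter]
  simp only [Bool.not_and, Bool.not_not]

theorem pvTag_pred (gs : List (List Int × List (List Int))) (c : Int) :
    (gs.all fun g => !g.1.contains c || (pvIG g).contains c)
      = !((pvTag gs).any fun p => p.2.contains c && !p.1.contains c) := by
  rw [List.not_any_eq_all_not, Bool.eq_iff_iff]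
  simp only [List.all_eq_true, pvTag, List.mem_flatMap, List.mem_map, Bool.or_eq_true,
    Bool.not_eq_true', Bool.not_and, Bool.not_not, List.contains_iff_mem]
  constructor
  · rintro h p ⟨g, hg, t, ht, rfl⟩
    rcases h g hg with hng | hig
    · simp_all
    · have := (pvIG_mem g c).mp (by simpa using hig)
      simp_all
  · intro h g hg
    by_cases hc : c ∈ g.1
    · right
      rw [pvIG_mem]
      refine ⟨hc, fun t ht => ?_⟩
      have := h (t, g.1) ⟨g, hg, t, ht, rfl⟩
      simp_all
    · left
      simp_all

-- ===== VERDICT (by name: the statement is the Claim_ definition above) =====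
theorem removeSubsetsGetAbsCandidate_spec : Claim_equal_removeSubsetsGetAbsCandidate := by
  intro matrix _
  unfold Spec_removeSubsetsGetAbsCandidate removeSubsetsGetAbsCandidate removeSubsetsGetAbsCandidate_alt
  simp only []
  set pool := PySem.List.sorted (matrix.map pvSetList) (fun s => s.length) true with hpool
  have hPfilter : pool.filter (pvP []) = pool :=
    List.filter_eq_self.mpr (fun t _ => rfl)
  rw [pvMain_eq pool.length pool PySem.Dict.empty le_rfl]
  rw [pvBScan_eq pool [] []]
  have hkept : pvKF [] pool = (pvPhase1 pool).map (fun g => g.1) := by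
    rw [pvKF_eq pool [], hPfilter, List.nil_append]
  have hnd : ((pvPhase1 pool).foldl pvP2step PySem.Dict.empty).keys.Nodup :=
    pvFold_nodup _ _ PySem.Dict.nodup_keys_empty
  refine Prod.ext (by rw [hkept]) ?_
  simp only [List.nil_append]
  -- A side: items of the dict fold, filtered on the value, projected to keys
  rw [PySem.Dict.items_eq_map_keys _ hnd true, List.filter_map, List.map_map]
  have hAP : ∀ c : Int,
      (((fun p : Int × Bool => p.2) ∘ fun k => (k, ((pvPhase1 pool).foldl pvP2step PySem.Dict.empty).getD k true)) c)
        = ((pvPhase1 pool).all fun g => !g.1.contains c || (pvIG g).contains c) := by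
    intro c
    simp only [Function.comp]
    rw [pvFold_getD, PySem.Dict.getD_empty, Bool.true_and]
  rw [List.filter_congr (fun c _ => hAP c)]
  rw [show ((fun p : Int × Bool => p.1) ∘ fun k => (k, ((pvPhase1 pool).foldl pvP2step PySem.Dict.empty).getD k true)) = id from rfl,
    List.map_id]
  rw [pvFold_keys, PySem.Dict.keys_empty]
  -- B side: the cols fold is the same Set.update fold, the pred the same all
  rw [hkept, List.foldl_map]
  have hBP : ∀ c : Int,
      ((pvOw [] pool).filter (fun p => p.2.contains c)).all (fun p => p.1.contains c)
        = ((pvPhase1 pool).all fun g => !g.1.contains c || (pvIG g).contains c) := by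
    intro c
    rw [pvFilterAll, pvOw_any pool [] (fun p => p.2.contains c && !p.1.contains c), hPfilter]
    rw [pvTag_pred]
    simp
  rw [List.filter_congr (fun c _ => hBP c)]
  rfl
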